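-- pv_equiv track=rewrite | github.com/k-harada/AtCoder | ABC/ABC1XX/ABC162/B.py | solve
-- ===== SOURCE A (Python) =====
-- def solve(n):
--     res = 0
--     for i in range(1, n + 1):
--         if i % 3 == 0 or i % 5 == 0:
--             continue
--         else:
--             res += i
--     return res
-- ===== SOURCE B (Python) =====
-- def solve(n):
--     m = n if n > 0 else 0
--
--     def tri(x):
--         return x * (x + 1) // 2
--
--     return tri(m) - 3 * tri(m // 3) - 5 * tri(m // 5) + 15 * tri(m // 15)
-- ===== Notes on version B (the rewrite author's own statement) =====
-- stated objective: faster
-- what changed: replaced the O(n) loop over range(1,n+1) with a closed-form arithmetic-series formula using inclusion-exclusion over multiples of 3, 5 and 15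
import Mathlib
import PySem

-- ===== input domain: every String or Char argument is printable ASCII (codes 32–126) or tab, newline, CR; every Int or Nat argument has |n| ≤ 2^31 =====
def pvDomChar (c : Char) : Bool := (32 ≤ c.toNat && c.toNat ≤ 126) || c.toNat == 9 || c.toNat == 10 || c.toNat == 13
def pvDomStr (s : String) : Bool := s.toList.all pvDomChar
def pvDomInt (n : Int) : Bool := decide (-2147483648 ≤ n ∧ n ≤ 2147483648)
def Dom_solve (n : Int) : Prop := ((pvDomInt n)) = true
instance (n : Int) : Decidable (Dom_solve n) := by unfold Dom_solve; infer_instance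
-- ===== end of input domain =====

-- B replaces A's O(n) loop by a closed-form inclusion-exclusion formula over multiples of 3, 5, 15 (objective: faster, asymptotic).


-- ===== PORT A =====
def solve (n : Int) : Int :=
  (PySem.List.pyRange 1 (n + 1) 1).foldl
    (fun res i => if PySem.Int.mod i 3 = 0 ∨ PySem.Int.mod i 5 = 0 then res else res + i) 0

-- ===== PORT B =====
def triB (x : Int) : Int := PySem.Int.floordiv (x * (x + 1)) 2

def solve_alt (n : Int) : Int :=
  let m := if n > 0 then n else 0
  triB m - 3 * triB (PySem.Int.floordiv m 3) - 5 * triB (PySem.Int.floordiv m 5)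
    + 15 * triB (PySem.Int.floordiv m 15)

-- ===== PRECONDITION & SPEC =====
def Spec_solve (n : Int) (out : Int) : Prop := out = solve_alt n
instance (n : Int) (out : Int) : Decidable (Spec_solve n out) := by unfold Spec_solve; infer_instance

-- ===== CLAIM (what is proved, stated in full; the proofs are below) =====
def Claim_equal_solve : Prop := ∀ (n : Int), Dom_solve n → Spec_solve n (solve n)

-- ===== LEMMAS AND PROOFS =====

theorem triB_succ (x : Int) : triB (x + 1) = triB x + (x + 1) := by
  obtain ⟨c, hc⟩ := Int.even_mul_succ_self x
  have h1 : x * (x + 1) = 2 * c := by omega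
  have h2 : (x + 1) * (x + 1 + 1) = 2 * (c + (x + 1)) := by nlinarith
  simp only [triB, PySem.Int.floordiv, h1, h2]
  rw [Int.mul_fdiv_cancel_left _ (by norm_num), Int.mul_fdiv_cancel_left _ (by norm_num)]

theorem floordiv_eq_ediv (a b : Int) (hb : 0 ≤ b) : PySem.Int.floordiv a b = a / b := by
  simp [PySem.Int.floordiv, Int.fdiv_eq_ediv_of_nonneg, hb]

theorem mod_eq_emod (a b : Int) (hb : 0 ≤ b) : PySem.Int.mod a b = a % b := by
  simp [PySem.Int.mod, Int.fmod_eq_emod_of_nonneg, hb]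

theorem alt_nonpos (n : Int) (h : ¬ 0 < n) : solve_alt n = 0 := by
  simp [solve_alt, h, triB, PySem.Int.floordiv, Int.fdiv]

theorem alt_step (m : Int) (hm : 0 ≤ m) :
    solve_alt (m + 1) = solve_alt m +
      (if PySem.Int.mod (m + 1) 3 = 0 ∨ PySem.Int.mod (m + 1) 5 = 0 then 0 else m + 1) := by
  by_cases hm0 : 0 < m
  case neg =>
    have : m = 0 := by omega
    subst this; decide
  case pos =>
    simp only [solve_alt, show (0:Int) < m + 1 by omega, hm0, if_pos]
    rw [mod_eq_emod _ 3 (by norm_num), mod_eq_emod _ 5 (by norm_num)]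
    rw [floordiv_eq_ediv _ 3 (by norm_num), floordiv_eq_ediv _ 5 (by norm_num),
        floordiv_eq_ediv _ 15 (by norm_num), floordiv_eq_ediv _ 3 (by norm_num),
        floordiv_eq_ediv _ 5 (by norm_num), floordiv_eq_ediv _ 15 (by norm_num)]
    by_cases h3 : (m + 1) % 3 = 0 <;> by_cases h5 : (m + 1) % 5 = 0
    · -- divisible by both 3 and 5 hence 15
      have e3 : (m + 1) / 3 = m / 3 + 1 := by omega
      have e5 : (m + 1) / 5 = m / 5 + 1 := by omega
      have e15 : (m + 1) / 15 = m / 15 + 1 := by omega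
      rw [e3, e5, e15, triB_succ, triB_succ, triB_succ, triB_succ]
      simp only [h3, h5, if_pos, or_true]
      have d3 : 3 * ((m + 1) / 3) = m + 1 := by omega
      have d5 : 5 * ((m + 1) / 5) = m + 1 := by omega
      have d15 : 15 * ((m + 1) / 15) = m + 1 := by omega
      rw [e3] at d3; rw [e5] at d5; rw [e15] at d15
      ring_nf
      omega
    · have h15 : (m + 1) % 15 ≠ 0 := by omega
      have e3 : (m + 1) / 3 = m / 3 + 1 := by omega
      have e5 : (m + 1) / 5 = m / 5 := by omega
      have e15 : (m + 1) / 15 = m / 15 := by omega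
      rw [e3, e5, e15, triB_succ, triB_succ]
      simp only [h3, if_pos, true_or]
      have d3 : 3 * ((m + 1) / 3) = m + 1 := by omega
      rw [e3] at d3
      ring_nf
      omega
    · have h15 : (m + 1) % 15 ≠ 0 := by omega
      have e3 : (m + 1) / 3 = m / 3 := by omega
      have e5 : (m + 1) / 5 = m / 5 + 1 := by omega
      have e15 : (m + 1) / 15 = m / 15 := by omega
      rw [e3, e5, e15, triB_succ, triB_succ]
      simp only [h5, if_pos, or_true]
      have d5 : 5 * ((m + 1) / 5) = m + 1 := by omega
      rw [e5] at d5
      ring_nf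
      omega
    · have h15 : (m + 1) % 15 ≠ 0 := by omega
      have e3 : (m + 1) / 3 = m / 3 := by omega
      have e5 : (m + 1) / 5 = m / 5 := by omega
      have e15 : (m + 1) / 15 = m / 15 := by omega
      rw [e3, e5, e15, triB_succ]
      simp only [h3, h5, or_self, if_neg, not_false_iff]
      ring_nf

theorem key (m : Nat) : solve (m : Int) = solve_alt (m : Int) := by
  induction m with
  | zero => decide
  | succ k ih =>
    have hsplit : PySem.List.pyRange 1 ((k : Int) + 1 + 1) 1
        = PySem.List.pyRange 1 ((k : Int) + 1) 1 ++ [(k : Int) + 1] :=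
      PySem.List.pyRange_one_succ_right (by omega)
    have hA : solve ((k : Int) + 1) = solve (k : Int) +
        (if PySem.Int.mod ((k : Int) + 1) 3 = 0 ∨ PySem.Int.mod ((k : Int) + 1) 5 = 0
          then 0 else (k : Int) + 1) := by
      simp only [solve, hsplit, List.foldl_append, List.foldl_cons, List.foldl_nil]
      split_ifs <;> simp_all
    have := alt_step (k : Int) (by omega)
    push_cast
    rw [hA, this, ih]

-- ===== VERDICT (by name: the statement is the Claim_ definition above) =====
theorem solve_spec : Claim_equal_solve := by
  intro n _
  unfold Spec_solve
  by_cases hn : 0 ≤ n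
  · obtain ⟨m, rfl⟩ := Int.eq_ofNat_of_zero_le hn
    exact key m
  · have h1 : solve n = 0 := by
      simp [solve, PySem.List.pyRange_one_eq_nil (by omega : n + 1 ≤ 1)]
    rw [h1, alt_nonpos n (by omega)]
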